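-- pv_equiv track=rewrite | github.com/talibilat-factor/Splade | evaluation.py | extract_source_filename
-- ===== SOURCE A (Python) =====
-- def extract_source_filename(raw):
--     """Extract a PDF filename from the raw 'source document' field."""
--     if not raw:
--         return None
--     # Split by spaces and find token ending with .pdf
--     parts = raw.split()
--     for p in parts:
--         if p.lower().endswith('.pdf'):
--             return p
--     return None
-- ===== SOURCE B (Python) =====
-- def extract_source_filename(raw):
--     """Extract a PDF filename from the raw 'source document' field."""
--     if not raw:
--         return None
--     # Single character scan: accumulate the current token, check it at each
--     # whitespace boundary (and at the end) instead of building a token list.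
--     token = ""
--     for ch in raw:
--         if ch.isspace():
--             if token[-4:].lower() == ".pdf":
--                 return token
--             token = ""
--         else:
--             token += ch
--     return token if token[-4:].lower() == ".pdf" else None
-- ===== Notes on version B (the rewrite author's own statement) =====
-- stated objective: alternative
-- what changed: Replaced split()-into-a-token-list-then-linear-scan with a single character-level scan that accumulates the current token and tests it at each whitespace boundary, using a last-4-chars slice comparison instead of lower().endswith().
import Mathlib
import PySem

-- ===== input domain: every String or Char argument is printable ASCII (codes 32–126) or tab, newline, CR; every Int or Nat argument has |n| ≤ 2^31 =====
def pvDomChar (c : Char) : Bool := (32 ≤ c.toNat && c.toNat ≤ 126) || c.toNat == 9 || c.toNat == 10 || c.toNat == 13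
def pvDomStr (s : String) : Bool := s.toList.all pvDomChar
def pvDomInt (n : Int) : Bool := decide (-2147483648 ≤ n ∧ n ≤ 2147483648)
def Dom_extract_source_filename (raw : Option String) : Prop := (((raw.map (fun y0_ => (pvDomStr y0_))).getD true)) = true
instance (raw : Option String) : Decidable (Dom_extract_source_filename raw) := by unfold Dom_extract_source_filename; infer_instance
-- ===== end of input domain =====

-- B replaces A's split-into-token-list-then-scan with a single character scan that
-- accumulates the current token and checks it at each whitespace boundary (objective: alternative).


-- ===== PORT A =====
-- the 'for p in parts: if p.lower().endswith(".pdf"): return p' loop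
def aLoop : List String → Option String
  | [] => none
  | p :: rest => if PySem.Str.endswith (PySem.Str.lower p) ".pdf" then some p else aLoop rest

def extract_source_filename (raw : Option String) : Option String :=
  match raw with
  | none => none
  | some s => if s = "" then none else aLoop (PySem.Str.split₀ s)

-- ===== PORT B =====
-- B's check: token[-4:].lower() == ".pdf"  (slice, then lower, then ==; on the char list)
def bCheck (tok : List Char) : Bool :=
  PySem.Chars.lower (PySem.Chars.slice tok (some (-4)) none) == ".pdf".toList

-- B's 'for ch in raw' loop: tok is the accumulated current token
def bLoop : List Char → List Char → Option (List Char)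
  | [], tok => if bCheck tok then some tok else none
  | c :: rest, tok =>
    if PySem.Chars.isspace c then
      if bCheck tok then some tok else bLoop rest []
    else bLoop rest (tok ++ [c])

def extract_source_filename_alt (raw : Option String) : Option String :=
  match raw with
  | none => none
  | some s => if s = "" then none else (bLoop s.toList []).map String.ofList

-- ===== PRECONDITION & SPEC =====
def Spec_extract_source_filename (raw : Option String) (out : Option String) : Prop := out = extract_source_filename_alt raw
instance (raw : Option String) (out : Option String) : Decidable (Spec_extract_source_filename raw out) := by unfold Spec_extract_source_filename; infer_instance

-- ===== CLAIM (what is proved, stated in full; the proofs are below) =====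
def Claim_equal_extract_source_filename : Prop := ∀ (raw : Option String), Dom_extract_source_filename raw → Spec_extract_source_filename raw (extract_source_filename raw)

-- ===== LEMMAS AND PROOFS =====

-- A's test 'p.lower().endswith(".pdf")' equals B's test 'p[-4:].lower() == ".pdf"'
lemma slice_last4 (xs : List Char) :
    PySem.Chars.slice xs (some (-4)) none = xs.drop (xs.length - 4) := by
  have hc : PySem.List.clampIdx xs.length (-4) = xs.length - 4 := by
    simp only [PySem.List.clampIdx]; split_ifs <;> omega
  simp only [PySem.Chars.slice_eq_listSlice, PySem.List.slice, hc]
  exact List.take_of_length_le (by simp)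

lemma chk_eq (tok : List Char) :
    PySem.Chars.endswith (PySem.Chars.lower tok) ['.', 'p', 'd', 'f'] = bCheck tok := by
  simp only [bCheck, slice_last4, PySem.Chars.lower, PySem.Chars.endswith, List.map_drop,
    show ".pdf".toList = ['.', 'p', 'd', 'f'] from rfl]
  set l := tok.map PySem.Chars.lowerChar with hl
  have hlen : tok.length = l.length := by simp [hl]
  rw [hlen, Bool.eq_iff_iff]
  simp only [List.isSuffixOf_iff_suffix, beq_iff_eq]
  constructor
  · intro h
    have := List.suffix_iff_eq_drop.mp h
    simpa using this.symm
  · intro h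
    rw [← h]
    exact List.drop_suffix _ _

-- split₀.go's accumulator comes out in front
lemma go_acc (cs : List Char) : ∀ cur acc,
    PySem.Chars.split₀.go cs cur acc = acc.reverse ++ PySem.Chars.split₀.go cs cur [] := by
  induction cs with
  | nil => intro cur acc; simp only [PySem.Chars.split₀.go]; split_ifs <;> simp
  | cons c rest ih =>
    intro cur acc
    simp only [PySem.Chars.split₀.go]
    split_ifs with hsp hemp
    · exact ih [] acc
    · rw [ih [] (cur.reverse :: acc), ih [] [cur.reverse]]; simp
    · exact ih (c :: cur) acc

-- proof-side mirror of aLoop on char lists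
def aLoopL : List (List Char) → Option (List Char)
  | [] => none
  | t :: rest => if PySem.Chars.endswith (PySem.Chars.lower t) ['.', 'p', 'd', 'f'] then some t else aLoopL rest

lemma aLoop_map (l : List (List Char)) :
    aLoop (l.map String.ofList) = (aLoopL l).map String.ofList := by
  induction l with
  | nil => rfl
  | cons t rest ih =>
    simp only [List.map_cons, aLoop, aLoopL, PySem.Str.endswith, PySem.Str.toList_lower,
      String.toList_ofList, show ".pdf".toList = ['.', 'p', 'd', 'f'] from rfl]
    split_ifs <;> simp [ih]

lemma bCheck_nil : bCheck [] = false := by decide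

-- the simulation: scanning the split tokens = B's character scan
lemma main_sim (cs : List Char) : ∀ cur,
    aLoopL (PySem.Chars.split₀.go cs cur []) = bLoop cs cur.reverse := by
  induction cs with
  | nil =>
    intro cur
    simp only [PySem.Chars.split₀.go, bLoop]
    rcases cur with _ | ⟨c, cur'⟩
    · simp [aLoopL, bCheck_nil]
    · simp only [List.isEmpty_cons, if_neg Bool.false_ne_true]
      simp [aLoopL, chk_eq]
  | cons c rest ih =>
    intro cur
    simp only [PySem.Chars.split₀.go, bLoop]
    by_cases hsp : PySem.Chars.isspace c = true
    · simp only [hsp, if_true]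
      rcases cur with _ | ⟨d, cur'⟩
      · simpa [bCheck_nil] using ih []
      · simp only [List.isEmpty_cons, if_neg Bool.false_ne_true]
        rw [go_acc]
        simp only [List.reverse_cons, List.reverse_nil, List.nil_append, List.singleton_append,
          aLoopL, chk_eq]
        rw [ih []]
        rfl
    · simp only [hsp]
      simpa using ih (c :: cur)

-- ===== VERDICT (by name: the statement is the Claim_ definition above) =====
theorem extract_source_filename_spec : Claim_equal_extract_source_filename := by
  intro raw _
  unfold Spec_extract_source_filename
  match raw with
  | none => rfl
  | some s =>
    simp only [extract_source_filename, extract_source_filename_alt]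
    split_ifs with h
    · rfl
    · rw [PySem.Str.split₀, PySem.Chars.split₀, aLoop_map]
      rw [show aLoopL (PySem.Chars.split₀.go s.toList [] []) = bLoop s.toList [] from main_sim s.toList []]
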